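-- pv_equiv track=rewrite | github.com/wechu/TDRepresentationLearning | analyze.py | compute_returns
-- ===== SOURCE A (Python) =====
-- def compute_returns(trajectory):
--     # This only works if we can guarantee that all episodes end with a done flag (not timing out)
--     # computes a list of returns per episode
--     # ignores the final episode if it's not complete
--     returns = []
--     total_reward = 0
--     for s, a, r, done in trajectory:
--         total_reward += r
--         if done:
--             returns.append(total_reward)
--             total_reward = 0
--     return returns
-- ===== SOURCE B (Python) =====
-- def compute_returns(trajectory):
--     # Never reset: record the running cumulative reward at each terminal step,
--     # then recover per-episode returns as differences of consecutive marks.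
--     marks = []
--     total = 0
--     for step in trajectory:
--         total += step[2]
--         if step[3]:
--             marks.append(total)
--     return [b - a for a, b in zip([0] + marks, marks)]
-- ===== Notes on version B (the rewrite author's own statement) =====
-- stated objective: alternative
-- what changed: B never resets the accumulator: it records the global cumulative reward at each done step and reconstructs per-episode returns as differences of consecutive cumulative marks, instead of A's reset-on-done running total.
import Mathlib
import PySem

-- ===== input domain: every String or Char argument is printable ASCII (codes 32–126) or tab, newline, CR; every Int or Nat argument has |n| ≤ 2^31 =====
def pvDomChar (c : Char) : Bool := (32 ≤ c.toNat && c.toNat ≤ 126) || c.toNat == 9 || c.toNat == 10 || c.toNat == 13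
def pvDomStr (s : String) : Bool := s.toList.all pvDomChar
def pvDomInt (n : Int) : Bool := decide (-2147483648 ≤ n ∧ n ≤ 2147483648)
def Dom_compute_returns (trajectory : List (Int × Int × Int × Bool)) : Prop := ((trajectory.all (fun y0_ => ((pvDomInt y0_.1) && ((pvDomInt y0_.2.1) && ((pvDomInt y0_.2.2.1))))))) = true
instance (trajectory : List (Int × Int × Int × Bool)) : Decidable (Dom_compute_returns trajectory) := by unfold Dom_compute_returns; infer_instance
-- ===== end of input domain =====

-- B records the global cumulative reward at each done step (never resetting) and returns
-- differences of consecutive marks; same values as A by a different decomposition (not faster).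

-- ===== PORT A =====
def computeReturnsLoopA : List (Int × Int × Int × Bool) → List Int → Int → List Int
  | [], returns, _ => returns
  | (_, _, r, done) :: rest, returns, total_reward =>
    let t := total_reward + r
    if done then computeReturnsLoopA rest (returns ++ [t]) 0
    else computeReturnsLoopA rest returns t

def compute_returns (trajectory : List (Int × Int × Int × Bool)) : List Int :=
  computeReturnsLoopA trajectory [] 0

-- ===== PORT B =====
-- the body of Source B's for-loop: state is (marks, total); total is never reset
def markStep (st : List Int × Int) (step : Int × Int × Int × Bool) : List Int × Int :=
  let t := st.2 + step.2.2.1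
  if step.2.2.2 then (st.1 ++ [t], t) else (st.1, t)

def compute_returns_alt (trajectory : List (Int × Int × Int × Bool)) : List Int :=
  let marks := (trajectory.foldl markStep ([], 0)).1
  (List.zip (0 :: marks) marks).map (fun p => p.2 - p.1)

-- ===== PRECONDITION & SPEC =====
def Spec_compute_returns (trajectory : List (Int × Int × Int × Bool)) (out : List Int) : Prop := out = compute_returns_alt trajectory
instance (trajectory : List (Int × Int × Int × Bool)) (out : List Int) : Decidable (Spec_compute_returns trajectory out) := by unfold Spec_compute_returns; infer_instance

-- ===== CLAIM (what is proved, stated in full; the proofs are below) =====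
def Claim_equal_compute_returns : Prop := ∀ (trajectory : List (Int × Int × Int × Bool)), Dom_compute_returns trajectory → Spec_compute_returns trajectory (compute_returns trajectory)

-- ===== LEMMAS AND PROOFS =====

-- successive differences of a mark list, starting from baseline c
def diffFrom (c : Int) : List Int → List Int
  | [] => []
  | m :: ms => (m - c) :: diffFrom m ms

theorem zip_diff_eq_diffFrom (c : Int) (ms : List Int) :
    (List.zip (c :: ms) ms).map (fun p => p.2 - p.1) = diffFrom c ms := by
  induction ms generalizing c with
  | nil => rfl
  | cons m ms ih => simp [diffFrom, ih]

theorem foldl_markStep_acc (traj : List (Int × Int × Int × Bool)) :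
    ∀ (ms : List Int) (tot : Int),
      List.foldl markStep (ms, tot) traj
        = (ms ++ (List.foldl markStep ([], tot) traj).1, (List.foldl markStep ([], tot) traj).2) := by
  induction traj with
  | nil => intro ms tot; simp
  | cons hd rest ih =>
    intro ms tot
    obtain ⟨s, a, r, done⟩ := hd
    by_cases h : done = true
    · subst h
      simp only [List.foldl_cons, markStep, if_true, List.nil_append]
      rw [ih [tot + r], ih (ms ++ [tot + r])]
      simp
    · simp only [List.foldl_cons, markStep, h]
      exact ih ms (tot + r)

theorem loopA_eq_diff_marks (traj : List (Int × Int × Int × Bool)) :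
    ∀ (rets : List Int) (c t : Int),
      computeReturnsLoopA traj rets t
        = rets ++ diffFrom c (List.foldl markStep ([], c + t) traj).1 := by
  induction traj with
  | nil => intro rets c t; simp [computeReturnsLoopA, diffFrom]
  | cons hd rest ih =>
    intro rets c t
    obtain ⟨s, a, r, done⟩ := hd
    by_cases h : done = true
    · subst h
      simp only [computeReturnsLoopA, if_true, List.foldl_cons, markStep, List.nil_append]
      rw [foldl_markStep_acc rest [c + t + r] (c + t + r)]
      have h0 : c + (t + r) + 0 = c + t + r := by ring
      have h1 : c + (t + r) = c + t + r := by ring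
      rw [ih (rets ++ [t + r]) (c + (t + r)) 0, h0, h1]
      have h2 : c + t + r - c = t + r := by ring
      simp [diffFrom, h2]
    · simp only [computeReturnsLoopA, h, List.foldl_cons, markStep]
      have : c + t + r = c + (t + r) := by ring
      rw [this]
      exact ih rets c (t + r)

-- ===== VERDICT (by name: the statement is the Claim_ definition above) =====
theorem compute_returns_spec : Claim_equal_compute_returns := by
  intro trajectory _
  unfold Spec_compute_returns compute_returns compute_returns_alt
  rw [zip_diff_eq_diffFrom]
  simpa using loopA_eq_diff_marks trajectory [] 0 0
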